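-- pv_equiv track=rewrite | github.com/djinterp/djinterp-core | scripts/generator_macro_varg_get_arg.py | _define_macro_multiline
-- ===== SOURCE A (Python) =====
-- def _chunk(items: list[str], n: int) -> list[list[str]]:
--     return [items[i : i + n] for i in range(0, len(items), n)]
--
-- def _define_macro_multiline(name: str, params: list[str], body: str, per_line: int) -> list[str]:
--     """
--     Produces:
--       #define NAME(p1, p2, ..., \
--                    pK, ...) \
--           body
--     """
--     if per_line < 1:
--         per_line = 1
--
--     prefix = f"#define {name}("
--     cont_indent = " " * len(prefix)
--
--     groups = _chunk(params, per_line)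
--     lines: list[str] = []
--
--     for gi, grp in enumerate(groups):
--         is_last = (gi == len(groups) - 1)
--         joined = ", ".join(grp)
--         if gi == 0:
--             line = prefix + joined
--         else:
--             line = cont_indent + joined
--
--         if is_last:
--             line += ") \\"
--         else:
--             line += ", \\"
--
--         lines.append(line)
--
--     lines.append(f"    {body}")
--     return lines
-- ===== SOURCE B (Python) =====
-- def _define_macro_multiline(name: str, params: list[str], body: str, per_line: int) -> list[str]:
--     # Single streaming pass with an explicit buffer; no intermediate chunk list.
--     k = per_line if per_line >= 1 else 1
--     prefix = f"#define {name}("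
--     cont_indent = " " * len(prefix)
--     n = len(params)
--     lines: list[str] = []
--     buf: list[str] = []
--     for i, p in enumerate(params):
--         buf.append(p)
--         if len(buf) == k or i == n - 1:
--             head = prefix if not lines else cont_indent
--             tail = ") \\" if i == n - 1 else ", \\"
--             lines.append(head + ", ".join(buf) + tail)
--             buf = []
--     lines.append(f"    {body}")
--     return lines
-- ===== Notes on version B (the rewrite author's own statement) =====
-- stated objective: simpler
-- what changed: Replaced the _chunk helper + enumerate-over-groups pass with a single streaming pass over params that flushes an explicit buffer when it reaches per_line items or the last param.
import Mathlib
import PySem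

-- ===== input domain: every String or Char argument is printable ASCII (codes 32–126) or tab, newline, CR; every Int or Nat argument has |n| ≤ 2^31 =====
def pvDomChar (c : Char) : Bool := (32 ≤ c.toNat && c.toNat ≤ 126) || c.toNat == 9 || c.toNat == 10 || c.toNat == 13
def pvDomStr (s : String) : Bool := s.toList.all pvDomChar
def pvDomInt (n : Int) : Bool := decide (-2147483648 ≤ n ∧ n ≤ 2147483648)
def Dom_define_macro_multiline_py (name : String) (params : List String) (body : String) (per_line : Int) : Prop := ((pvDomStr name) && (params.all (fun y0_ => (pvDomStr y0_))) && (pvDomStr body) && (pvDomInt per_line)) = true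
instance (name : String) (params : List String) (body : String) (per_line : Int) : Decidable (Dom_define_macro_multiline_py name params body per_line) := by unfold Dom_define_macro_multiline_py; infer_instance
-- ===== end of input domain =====

-- B replaces A's _chunk helper + loop over the chunk list by a single streaming pass over
-- params with an explicit buffer (objective: simpler, same O(n) cost).

-- ===== PORT A =====
-- _chunk(items, n)
def pyChunk (items : List String) (n : Int) : List (List String) :=
  (PySem.List.pyRange 0 (PySem.List.len items) n).map
    (fun i => PySem.List.slice items (some i) (some (i + n)))

def define_macro_multiline_py (name : String) (params : List String) (body : String) (per_line : Int) : List String :=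
  let pl := if per_line < 1 then 1 else per_line
  let pfx := "#define " ++ name ++ "("
  -- " " * len(prefix): exact, prefix is a concrete character list
  let cont_indent := String.ofList (List.replicate pfx.toList.length ' ')
  let groups := pyChunk params pl
  let lines :=
    (PySem.List.enumerate groups 0).foldl (fun lines p =>
      let joined := PySem.Str.join ", " p.2
      let line := if p.1 == 0 then pfx ++ joined else cont_indent ++ joined
      let line := if p.1 == PySem.List.len groups - 1 then line ++ ") \\" else line ++ ", \\"
      lines ++ [line]) []
  lines ++ ["    " ++ body]

-- ===== PORT B =====
def define_macro_multiline_py_alt (name : String) (params : List String) (body : String) (per_line : Int) : List String :=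
  let k := if per_line ≥ 1 then per_line else 1
  let pfx := "#define " ++ name ++ "("
  let cont_indent := String.ofList (List.replicate pfx.toList.length ' ')
  let n := PySem.List.len params
  let st :=
    (PySem.List.enumerate params 0).foldl (fun st p =>
      let buf := st.2 ++ [p.2]
      if PySem.List.len buf == k || p.1 == n - 1 then
        let head := if st.1.isEmpty then pfx else cont_indent
        let tail := if p.1 == n - 1 then ") \\" else ", \\"
        (st.1 ++ [head ++ PySem.Str.join ", " buf ++ tail], ([] : List String))
      else (st.1, buf)) (([] : List String), ([] : List String))
  st.1 ++ ["    " ++ body]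

-- ===== PRECONDITION & SPEC =====
def Spec_define_macro_multiline_py (name : String) (params : List String) (body : String) (per_line : Int) (out : List String) : Prop := out = define_macro_multiline_py_alt name params body per_line
instance (name : String) (params : List String) (body : String) (per_line : Int) (out : List String) : Decidable (Spec_define_macro_multiline_py name params body per_line out) := by unfold Spec_define_macro_multiline_py; infer_instance

-- ===== CLAIM (what is proved, stated in full; the proofs are below) =====
def Claim_equal_define_macro_multiline_py : Prop := ∀ (name : String) (params : List String) (body : String) (per_line : Int), Dom_define_macro_multiline_py name params body per_line → Spec_define_macro_multiline_py name params body per_line (define_macro_multiline_py name params body per_line)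

-- ===== LEMMAS AND PROOFS =====

-- Common reference shape: the emitted macro lines, one group at a time.
def emitRef (head cont : String) (k : Nat) : List String → List String
  | [] => []
  | p :: rest =>
    (head ++ PySem.Str.join ", " (p :: List.take (k-1) rest) ++
        (if List.drop (k-1) rest = [] then ") \\" else ", \\"))
      :: emitRef cont cont k (List.drop (k-1) rest)
termination_by ps => ps.length
decreasing_by simp only [List.length_cons, List.length_drop]; omega

-- A's _chunk, recursively.
def chunkRec (k : Nat) : List String → List (List String)
  | [] => []
  | p :: rest => (p :: List.take (k-1) rest) :: chunkRec k (List.drop (k-1) rest)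
termination_by ps => ps.length
decreasing_by simp only [List.length_cons, List.length_drop]; omega

lemma chunkRec_eq_nil_iff (k : Nat) (ps : List String) : chunkRec k ps = [] ↔ ps = [] := by
  cases ps <;> simp [chunkRec]

lemma range_map_chunk (k : Nat) (hk : 1 ≤ k) :
    ∀ ps : List String,
      (List.range ((ps.length + k - 1) / k)).map (fun j => (ps.drop (k*j)).take k) = chunkRec k ps := by
  intro ps
  induction hl : ps.length using Nat.strong_induction_on generalizing ps with
  | _ m IH =>
  subst hl
  cases ps with
  | nil =>
    have h0 : (0 + k - 1) / k = 0 := Nat.div_eq_of_lt (by omega)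
    simp only [List.length_nil, h0, List.range_zero, List.map_nil, chunkRec]
  | cons p rest =>
    have hcount : ((p :: rest).length + k - 1) / k
        = ((List.drop (k-1) rest).length + k - 1) / k + 1 := by
      simp only [List.length_cons, List.length_drop]
      rcases Nat.le_total (rest.length + 1) k with h | h
      · have h1 : (rest.length + 1 + k - 1) / k = 1 := by
          apply Nat.div_eq_of_lt_le <;> omega
        have h2 : (rest.length - (k-1) + k - 1) / k = 0 := Nat.div_eq_of_lt (by omega)
        omega
      · have h3 : rest.length + 1 + k - 1 = (rest.length - (k-1) + k - 1) + k := by omega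
        rw [h3, Nat.add_div_right _ (by omega)]
    rw [hcount]
    simp only [List.range_succ_eq_map, List.map_cons, List.map_map, Nat.mul_zero, List.drop_zero]
    have hdk : (p :: rest).drop k = List.drop (k-1) rest := by
      cases k with
      | zero => omega
      | succ k' => simp
    have hIH := IH ((List.drop (k-1) rest).length)
      (by simp only [List.length_drop, List.length_cons]; omega)
      (List.drop (k-1) rest) rfl
    rw [chunkRec, ← hIH]
    congr 1
    · cases k with
      | zero => omega
      | succ k' => simp [List.take_succ_cons]
    · apply List.map_congr_left
      intro j _
      simp only [Function.comp, Nat.succ_eq_add_one]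
      rw [← hdk, List.drop_drop]
      congr 2
      ring

-- pyChunk is chunkRec (positive chunk size).
lemma pyChunk_eq_chunkRec (k : Nat) (hk : 1 ≤ k) (ps : List String) :
    pyChunk ps (k : Int) = chunkRec k ps := by
  unfold pyChunk
  rw [PySem.List.pyRange_of_pos 0 (PySem.List.len ps) (by exact_mod_cast hk)]
  rw [List.map_map]
  rw [← range_map_chunk k hk ps]
  have hcnt : (if (0:Int) < PySem.List.len ps then ((PySem.List.len ps - 0 + k - 1) / k).toNat else 0)
      = (ps.length + k - 1) / k := by
    simp only [PySem.List.len_eq]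
    split_ifs with h
    · have h1 : ((ps.length : Int) - 0 + k - 1) = ((ps.length + k - 1 : Nat) : Int) := by
        omega
      rw [h1]
      rfl
    · have : ps.length = 0 := by omega
      rw [this]
      have : (0 + k - 1) / k = 0 := Nat.div_eq_of_lt (by omega)
      omega
  rw [hcnt]
  apply List.map_congr_left
  intro j _
  simp only [Function.comp]
  have h1 : (0 : Int) + (k : Int) * (j : Int) = ((k * j : Nat) : Int) := by push_cast; ring
  have h2 : (0 : Int) + (k : Int) * (j : Int) + (k : Int) = ((k * j : Nat) : Int) + ((k : Nat) : Int) := by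
    push_cast; ring
  rw [h1] at h2 ⊢
  rw [h2, PySem.List.slice_natCast_add]

-- A's enumerate-fold, recursively (G is len(groups), fixed in the loop body).
def emitA (pre cont : String) (G : Int) : List (List String) → Int → List String
  | [], _ => []
  | g :: rest, s =>
    ((if s == 0 then pre ++ PySem.Str.join ", " g else cont ++ PySem.Str.join ", " g) ++
        (if s == G - 1 then ") \\" else ", \\"))
      :: emitA pre cont G rest (s+1)

lemma foldA_eq_emitA (pre cont : String) (G : Int) :
    ∀ (gs : List (List String)) (s : Int) (acc : List String),
      (PySem.List.enumerate gs s).foldl (fun lines p =>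
        let joined := PySem.Str.join ", " p.2
        let line := if p.1 == 0 then pre ++ joined else cont ++ joined
        let line := if p.1 == G - 1 then line ++ ") \\" else line ++ ", \\"
        lines ++ [line]) acc
      = acc ++ emitA pre cont G gs s := by
  intro gs
  induction gs with
  | nil => intro s acc; simp [PySem.List.enumerate_nil, emitA]
  | cons g rest IH =>
    intro s acc
    rw [PySem.List.enumerate_cons, List.foldl_cons, IH, emitA]
    simp only []
    split_ifs <;> simp
    
-- emitA over chunkRec is emitRef.
lemma emitA_chunkRec (pre cont : String) (k : Nat) (_hk : 1 ≤ k) (G : Int) :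
    ∀ (ps : List String) (s : Int), 0 ≤ s → s + (chunkRec k ps).length = G →
      emitA pre cont G (chunkRec k ps) s = emitRef (if s == 0 then pre else cont) cont k ps := by
  intro ps
  induction hl : ps.length using Nat.strong_induction_on generalizing ps with
  | _ m IH =>
  intro s hs hG
  subst hl
  cases ps with
  | nil => simp [chunkRec, emitA, emitRef]
  | cons p rest =>
    rw [chunkRec] at hG ⊢
    rw [emitA, emitRef]
    simp only [List.length_cons, Nat.cast_add, Nat.cast_one] at hG
    have hrec := IH ((List.drop (k-1) rest).length)
      (by simp only [List.length_drop, List.length_cons]; omega)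
      (List.drop (k-1) rest) rfl (s+1) (by omega) (by omega)
    have hs1 : ((s+1 : Int) == 0) = false := by simp; omega
    rw [hrec, hs1]
    simp only [Bool.false_eq_true, if_false]
    by_cases hdrop : List.drop (k-1) rest = []
    · have hlen0 : (chunkRec k (List.drop (k-1) rest)).length = 0 := by
        rw [hdrop]; simp [chunkRec]
      have hlast : (s == G - 1) = true := by simp; omega
      rw [hlast]
      simp only [hdrop, if_true]
      simp
      split_ifs <;> rfl
    · have hne : chunkRec k (List.drop (k-1) rest) ≠ [] := by
        rw [Ne, chunkRec_eq_nil_iff]; exact hdrop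
      have hlen : 0 < (chunkRec k (List.drop (k-1) rest)).length :=
        List.length_pos_of_ne_nil hne
      have hlast : (s == G - 1) = false := by simp; omega
      rw [hlast]
      simp [hdrop]
      split_ifs <;> rfl

-- B's no-flush segment: elements that neither fill the buffer nor end the list just accumulate.
lemma foldB_no_flush (pre cont : String) (k n : Int) :
    ∀ (xs : List String) (i : Int) (acc buf : List String),
      ((buf.length + xs.length : Nat) : Int) < k → i + xs.length < n →
      (PySem.List.enumerate xs i).foldl (fun st p =>
        let buf := st.2 ++ [p.2]
        if PySem.List.len buf == k || p.1 == n - 1 then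
          let head := if st.1.isEmpty then pre else cont
          let tail := if p.1 == n - 1 then ") \\" else ", \\"
          (st.1 ++ [head ++ PySem.Str.join ", " buf ++ tail], ([] : List String))
        else (st.1, buf)) (acc, buf)
      = (acc, buf ++ xs) := by
  intro xs
  induction xs with
  | nil => intro i acc buf _ _; simp [PySem.List.enumerate_nil]
  | cons x t IH =>
    intro i acc buf hk hn
    rw [PySem.List.enumerate_cons, List.foldl_cons]
    simp only [List.length_cons] at hk hn
    have hc1 : (PySem.List.len (buf ++ [x]) == k) = false := by
      simp [PySem.List.len_eq]
      omega
    have hc2 : ((i : Int) == n - 1) = false := by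
      simp; omega
    simp only [hc1, hc2, Bool.or_self, Bool.false_eq_true, if_false]
    rw [IH (i+1) acc (buf ++ [x]) (by push_cast at hk ⊢; simp; omega) (by push_cast at hn ⊢; omega)]
    simp

-- B's loop, one whole group at a time, equals emitRef.
lemma foldB_eq_emitRef (pre cont : String) (k n : Int) (kn : Nat) (hkn : (kn : Int) = k)
    (hk : 1 ≤ kn) :
    ∀ (ps : List String) (i : Int) (acc : List String),
      0 ≤ i → i + ps.length = n →
      (PySem.List.enumerate ps i).foldl (fun st p =>
        let buf := st.2 ++ [p.2]
        if PySem.List.len buf == k || p.1 == n - 1 then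
          let head := if st.1.isEmpty then pre else cont
          let tail := if p.1 == n - 1 then ") \\" else ", \\"
          (st.1 ++ [head ++ PySem.Str.join ", " buf ++ tail], ([] : List String))
        else (st.1, buf)) (acc, ([] : List String))
      = (acc ++ emitRef (if acc.isEmpty then pre else cont) cont kn ps, ([] : List String)) := by
  intro ps
  induction hl : ps.length using Nat.strong_induction_on generalizing ps with
  | _ m IH =>
  intro i acc hi hn
  subst hl
  cases ps with
  | nil => simp [PySem.List.enumerate_nil, emitRef]
  | cons p rest =>
    rw [emitRef]
    rcases Nat.lt_or_ge rest.length kn with hle | hgt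
    -- final (possibly short) group: everything left fits in one line
    · have hsplit : p :: rest = (p :: rest).dropLast ++ [(p :: rest).getLast (by simp)] := by
        exact (List.dropLast_append_getLast (by simp)).symm
      rw [hsplit, PySem.List.enumerate_append, List.foldl_append]
      have hob1 : ((([]:List String).length + ((p :: rest).dropLast).length : Nat) : Int) < k := by
        simp only [List.length_nil, List.length_dropLast, List.length_cons]; omega
      have hob2 : i + ((p :: rest).dropLast).length < n := by
        simp only [List.length_dropLast, List.length_cons] at hn ⊢; omega
      rw [foldB_no_flush pre cont k n ((p :: rest).dropLast) i acc [] hob1 hob2]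
      rw [PySem.List.enumerate_cons, PySem.List.enumerate_nil, List.foldl_cons, List.foldl_nil]
      simp only [List.nil_append]
      have hbuf : (p :: rest).dropLast ++ [(p :: rest).getLast (by simp)] = p :: rest :=
        List.dropLast_append_getLast (by simp)
      have hidx : (i + ((p :: rest).dropLast).length == n - 1) = true := by
        simp only [List.length_dropLast, List.length_cons] at hn ⊢
        simp; omega
      rw [hbuf, hidx]
      simp only [Bool.or_true, if_true]
      have htake : List.take (kn - 1) rest = rest := List.take_of_length_le (by omega)
      have hdrop : List.drop (kn - 1) rest = [] := List.drop_eq_nil_of_le (by omega)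
      rw [htake, hdrop]
      simp [emitRef]
    -- full group of kn params, more remain
    · have hg : (p :: rest).take kn = p :: List.take (kn-1) rest := by
        cases kn with
        | zero => omega
        | succ k' => simp [List.take_succ_cons]
      have hr : (p :: rest).drop kn = List.drop (kn-1) rest := by
        cases kn with
        | zero => omega
        | succ k' => simp
      have hps : p :: rest = (p :: rest).take kn ++ (p :: rest).drop kn := by simp
      rw [hps, PySem.List.enumerate_append, List.foldl_append]
      have hglen : ((p :: rest).take kn).length = kn := by
        simp only [List.length_take, List.length_cons]; omega
      have hgne : (p :: rest).take kn ≠ [] := by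
        intro h; rw [h] at hglen; simp at hglen; omega
      have hsplit : (p :: rest).take kn
          = ((p :: rest).take kn).dropLast ++ [((p :: rest).take kn).getLast hgne] := by
        exact (List.dropLast_append_getLast hgne).symm
      conv_lhs => rw [hsplit]
      rw [PySem.List.enumerate_append, List.foldl_append]
      have hob1 : ((([]:List String).length + (((p :: rest).take kn).dropLast).length : Nat) : Int) < k := by
        simp only [List.length_nil, List.length_dropLast, hglen]; omega
      have hob2 : i + (((p :: rest).take kn).dropLast).length < n := by
        simp only [List.length_dropLast, hglen, List.length_cons] at hn ⊢; omega
      rw [foldB_no_flush pre cont k n (((p :: rest).take kn).dropLast) i acc [] hob1 hob2]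
      rw [PySem.List.enumerate_cons, PySem.List.enumerate_nil, List.foldl_cons, List.foldl_nil]
      simp only [List.nil_append]
      have hbuf : ((p :: rest).take kn).dropLast ++ [((p :: rest).take kn).getLast hgne]
          = (p :: rest).take kn := List.dropLast_append_getLast hgne
      rw [hbuf]
      have hfull : (PySem.List.len ((p :: rest).take kn) == k) = true := by
        simp [PySem.List.len_eq, hglen, ← hkn]
      have hidx : (i + (((p :: rest).take kn).dropLast).length == n - 1) = false := by
        simp only [List.length_dropLast, hglen, List.length_cons] at hn ⊢
        simp; omega
      rw [hfull, hidx]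
      simp only [Bool.true_or, if_true, Bool.false_eq_true, if_false]
      have hrlen : ((p :: rest).drop kn).length < (p :: rest).length := by
        simp only [List.length_drop, List.length_cons]
        omega
      have hacc : (acc ++ [(if acc.isEmpty then pre else cont) ++ PySem.Str.join ", " ((p :: rest).take kn) ++ ", \\"]).isEmpty = false := by
        simp
      have hIH := IH ((p :: rest).drop kn).length hrlen ((p :: rest).drop kn) rfl
        (i + ((p :: rest).take kn).length)
        (acc ++ [(if acc.isEmpty then pre else cont) ++ PySem.Str.join ", " ((p :: rest).take kn) ++ ", \\"])
        (by omega)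
        (by simp only [List.length_take, List.length_drop, List.length_cons] at hn ⊢
            push_cast at hn ⊢
            omega)
      simp only [hacc] at hIH
      rw [hIH]
      simp only [Bool.false_eq_true, if_false]
      have hdropne : List.drop (kn-1) rest ≠ [] := by
        have : (List.drop (kn-1) rest).length = rest.length - (kn-1) := by simp
        intro h; rw [h] at this; simp at this; omega
      rw [hg, hr]
      simp [hdropne]

-- the two clamps agree
lemma clamp_eq (per_line : Int) :
    (if per_line ≥ 1 then per_line else 1) = (if per_line < 1 then 1 else per_line) := by
  split_ifs <;> omega

-- ===== VERDICT (by name: the statement is the Claim_ definition above) =====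
theorem define_macro_multiline_py_spec : Claim_equal_define_macro_multiline_py := by
  intro name params body per_line _
  unfold Spec_define_macro_multiline_py define_macro_multiline_py define_macro_multiline_py_alt
  simp only []
  rw [clamp_eq]
  set pl := if per_line < 1 then 1 else per_line with hpl
  have hpl1 : 1 ≤ pl := by rw [hpl]; split_ifs <;> omega
  set kn := pl.toNat with hknd
  have hkn : (kn : Int) = pl := by omega
  have hk1 : 1 ≤ kn := by omega
  set pfx := "#define " ++ name ++ "("
  set cont_ := String.ofList (List.replicate pfx.toList.length ' ')
  rw [← hkn, pyChunk_eq_chunkRec kn hk1 params]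
  rw [foldA_eq_emitA pfx cont_ (PySem.List.len (chunkRec kn params)) (chunkRec kn params) 0 []]
  rw [emitA_chunkRec pfx cont_ kn hk1 _ params 0 (by omega) (by simp [PySem.List.len_eq])]
  rw [foldB_eq_emitRef pfx cont_ (kn : Int) (PySem.List.len params) kn rfl hk1 params 0 []
    (by omega) (by simp [PySem.List.len_eq])]
  simp
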